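-- pv_equiv track=rewrite | github.com/isayaksh/Algorithm | BaekJoon/8983.py | solution
-- ===== SOURCE A (Python) =====
-- from bisect import bisect_left, bisect_right
--
-- def solution(N, M, L, X, animal):
--     answer = 0
--     X.sort()
--
--     for x, y in animal:
--         idx = bisect_left(X, x)
--
--         for i in range(-1, 2):
--             if 0 <= idx + i < M:
--                 if L - abs(x - X[idx+i]) >= y:
--                     answer +=1
--                     break
--
--     return answer
-- ===== SOURCE B (Python) =====
-- def solution(N, M, L, X, animal):
--     X.sort()
--     m = min(M, len(X))          # at most M cannons are in play
--     hits = 0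
--     k = 0                       # cannons strictly left of the current animal
--     for x, y in sorted(animal, key=lambda a: a[0]):
--         while k < len(X) and X[k] < x:
--             k += 1
--         reach = L - y
--         # the animal is hit iff its nearest cannon on the left or on the right reaches it
--         if (0 < k and k <= m and x - X[k - 1] <= reach) or (k < m and X[k] - x <= reach):
--             hits += 1
--     return hits
-- ===== Notes on version B (the rewrite author's own statement) =====
-- stated objective: alternative
-- what changed: Replaces A's online per-animal binary search (bisect_left, then an inner probe loop over indices idx-1, idx, idx+1 with bound checks, abs and a break) by an offline merge sweep: animals are sorted by x and a single monotone pointer walks the sorted cannons once, testing the predecessor and successor cannon directly; Pre_ excludes exactly the inputs on which A raises IndexError.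
import Mathlib
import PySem

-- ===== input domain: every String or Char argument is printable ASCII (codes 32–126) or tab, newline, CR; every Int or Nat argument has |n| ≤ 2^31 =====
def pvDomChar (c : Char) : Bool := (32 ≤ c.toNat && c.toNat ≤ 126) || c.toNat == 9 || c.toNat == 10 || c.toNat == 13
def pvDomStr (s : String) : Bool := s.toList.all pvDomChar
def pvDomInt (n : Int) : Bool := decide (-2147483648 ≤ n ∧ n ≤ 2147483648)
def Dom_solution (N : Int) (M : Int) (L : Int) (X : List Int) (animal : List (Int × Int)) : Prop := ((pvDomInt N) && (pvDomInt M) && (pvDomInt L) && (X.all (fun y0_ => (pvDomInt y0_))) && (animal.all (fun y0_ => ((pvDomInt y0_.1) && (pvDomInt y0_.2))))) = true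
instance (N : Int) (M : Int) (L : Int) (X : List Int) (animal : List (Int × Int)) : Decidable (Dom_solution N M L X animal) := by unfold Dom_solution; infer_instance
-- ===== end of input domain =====

-- B replaces A's per-animal binary search with a three-index probe loop by an offline merge
-- sweep: animals sorted by x, one monotone pointer over the sorted cannons, and a direct
-- predecessor/successor reach test (objective: alternative, similar cost).
-- Both A and B sort X in place; the equivalence proved here is about the RETURN value.


-- ===== PORT A =====
-- body of A's inner `for i in range(-1, 2)` loop with its break: any of the three probes hits
def pvProbe (Xs : List Int) (M L : Int) (p : Int × Int) : Bool :=
  ([-1, 0, 1] : List Int).any (fun i =>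
    decide (0 ≤ (PySem.List.bisectLeft Xs p.1 : Int) + i) &&
    decide ((PySem.List.bisectLeft Xs p.1 : Int) + i < M) &&
    decide (L - |p.1 - (PySem.List.pyGet? Xs ((PySem.List.bisectLeft Xs p.1 : Int) + i)).getD 0| ≥ p.2))

def solution (N : Int) (M : Int) (L : Int) (X : List Int) (animal : List (Int × Int)) : Int :=
  let Xs := PySem.List.sorted X (fun v => v) false        -- X.sort()
  animal.foldl (fun answer p => if pvProbe Xs M L p then answer + 1 else answer) 0

-- ===== PORT B =====
-- the `while k < len(X) and X[k] < x: k += 1` loop, walking the suffix X[k:]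
def pvAdvanceAux (x : Int) : List Int → Nat → Nat
  | [], k => k
  | a :: t, k => if a < x then pvAdvanceAux x t (k + 1) else k

def pvAdvance (Xs : List Int) (x : Int) (k : Nat) : Nat := pvAdvanceAux x (Xs.drop k) k

-- body of B's sweep loop: advance the pointer, test predecessor and successor
def pvStep (Xs : List Int) (m L : Int) (s : Nat × Int) (p : Int × Int) : Nat × Int :=
  let k := pvAdvance Xs p.1 s.1
  if (0 < k ∧ (k : Int) ≤ m ∧ p.1 - (PySem.List.pyGet? Xs ((k : Int) - 1)).getD 0 ≤ L - p.2)
      ∨ ((k : Int) < m ∧ (PySem.List.pyGet? Xs (k : Int)).getD 0 - p.1 ≤ L - p.2)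
  then (k, s.2 + 1) else (k, s.2)

def solution_alt (N : Int) (M : Int) (L : Int) (X : List Int) (animal : List (Int × Int)) : Int :=
  let Xs := PySem.List.sorted X (fun v => v) false        -- X.sort()
  let m : Int := min M (Xs.length : Int)
  ((PySem.List.sorted animal (fun p => p.1) false).foldl (pvStep Xs m L) (0, 0)).2

-- ===== PRECONDITION & SPEC =====
-- Pre_ excludes exactly the inputs on which A raises IndexError: M > len(X) together with some
-- animal (x, y) that has at most one cannon at or to the right of x and no cannon within reach
-- L - y (then A's probe loop reaches index len(X) or len(X)+1, which passes the `< M` guard).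
def Pre_solution (N : Int) (M : Int) (L : Int) (X : List Int) (animal : List (Int × Int)) : Prop :=
  M ≤ (X.length : Int) ∨
    ∀ p ∈ animal, ¬(X.countP (fun a => decide (p.1 ≤ a)) ≤ 1 ∧ ∀ a ∈ X, ¬(|p.1 - a| ≤ L - p.2))
instance (N : Int) (M : Int) (L : Int) (X : List Int) (animal : List (Int × Int)) : Decidable (Pre_solution N M L X animal) := by unfold Pre_solution; infer_instance

def pvWitness_solution : Int × Int × Int × List Int × (List (Int × Int)) :=
  (2, 2, 5, [10, 0], [(1, 2), (9, 9)])

def Spec_solution (N : Int) (M : Int) (L : Int) (X : List Int) (animal : List (Int × Int)) (out : Int) : Prop := out = solution_alt N M L X animal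
instance (N : Int) (M : Int) (L : Int) (X : List Int) (animal : List (Int × Int)) (out : Int) : Decidable (Spec_solution N M L X animal out) := by unfold Spec_solution; infer_instance

-- ===== CLAIM =====
def Claim_equal_solution : Prop := ∀ (N : Int) (M : Int) (L : Int) (X : List Int) (animal : List (Int × Int)), Dom_solution N M L X animal → Pre_solution N M L X animal → Spec_solution N M L X animal (solution N M L X animal)

-- ===== LEMMAS AND PROOFS =====

-- B's per-animal indicator with the pointer already at bisect_left
def pvInd (Xs : List Int) (m L : Int) (p : Int × Int) : Bool :=
  decide ((0 < PySem.List.bisectLeft Xs p.1 ∧ (PySem.List.bisectLeft Xs p.1 : Int) ≤ m ∧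
            p.1 - (PySem.List.pyGet? Xs ((PySem.List.bisectLeft Xs p.1 : Int) - 1)).getD 0 ≤ L - p.2)
      ∨ ((PySem.List.bisectLeft Xs p.1 : Int) < m ∧
            (PySem.List.pyGet? Xs (PySem.List.bisectLeft Xs p.1 : Int)).getD 0 - p.1 ≤ L - p.2))

-- monotonicity of a (≤)-pairwise-sorted list at indices
theorem sorted_mono_pv (Xs : List Int) (hs : Xs.Pairwise (· ≤ ·)) {p q : Nat}
    (hpq : p ≤ q) (hq : q < Xs.length) : Xs[p]'(by omega) ≤ Xs[q] := by
  rcases Nat.lt_or_ge p q with h | h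
  · exact List.pairwise_iff_getElem.mp hs p q (by omega) hq h
  · have : p = q := by omega
    subst this; exact le_refl _

-- on a sorted list, the elements ≥ x are exactly those from index bisectLeft on
theorem countP_ge_eq_pv (Xs : List Int) (hs : Xs.Pairwise (· ≤ ·)) (x : Int) :
    Xs.countP (fun a => decide (x ≤ a)) = Xs.length - PySem.List.bisectLeft Xs x := by
  obtain ⟨h1, h2, h3⟩ := PySem.List.bisectLeft_spec Xs x hs
  set idx := PySem.List.bisectLeft Xs x with hidx
  have hsplit := List.take_append_drop idx Xs
  have ht : (Xs.take idx).countP (fun a => decide (x ≤ a)) = 0 := by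
    rw [List.countP_eq_zero]
    intro a ha
    obtain ⟨i, hi, rfl⟩ := List.mem_iff_getElem.mp ha
    have hlen : (Xs.take idx).length = min idx Xs.length := List.length_take
    have hi1 : i < idx := by omega
    have hi2 : i < Xs.length := by omega
    have := h2 i hi2 hi1
    simp only [List.getElem_take, decide_eq_true_eq]
    omega
  have hd : (Xs.drop idx).countP (fun a => decide (x ≤ a)) = (Xs.drop idx).length := by
    rw [List.countP_eq_length]
    intro a ha
    obtain ⟨i, hi, rfl⟩ := List.mem_iff_getElem.mp ha
    have hlen : (Xs.drop idx).length = Xs.length - idx := List.length_drop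
    have hi2 : idx + i < Xs.length := by omega
    have := h3 (idx + i) hi2 (by omega)
    simp only [List.getElem_drop, decide_eq_true_eq]
    omega
  calc Xs.countP (fun a => decide (x ≤ a))
      = (Xs.take idx ++ Xs.drop idx).countP (fun a => decide (x ≤ a)) := by rw [hsplit]
    _ = Xs.length - idx := by
        rw [List.countP_append, ht, hd, List.length_drop]
        omega

-- the while loop lands exactly on bisect_left when started at or left of it
theorem pvAdvance_eq (Xs : List Int) (x : Int) (hs : Xs.Pairwise (· ≤ ·)) :
    ∀ (n k0 : Nat), Xs.length - k0 ≤ n → k0 ≤ PySem.List.bisectLeft Xs x →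
      pvAdvance Xs x k0 = PySem.List.bisectLeft Xs x := by
  obtain ⟨h1, h2, h3⟩ := PySem.List.bisectLeft_spec Xs x hs
  intro n
  induction n with
  | zero =>
    intro k0 hn hk
    unfold pvAdvance
    rw [List.drop_eq_nil_of_le (by omega)]
    simp only [pvAdvanceAux]
    omega
  | succ n ih =>
    intro k0 hn hk
    by_cases hkl : k0 < Xs.length
    · unfold pvAdvance
      rw [List.drop_eq_getElem_cons hkl]
      simp only [pvAdvanceAux]
      by_cases hx : Xs[k0] < x
      · rw [if_pos hx]
        have hlt : k0 < PySem.List.bisectLeft Xs x := by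
          by_contra hc
          have := h3 k0 hkl (by omega)
          omega
        exact ih (k0 + 1) (by omega) (by omega)
      · rw [if_neg hx]
        by_contra hne
        have hlt : k0 < PySem.List.bisectLeft Xs x := by omega
        exact hx (h2 k0 hkl hlt)
    · unfold pvAdvance
      rw [List.drop_eq_nil_of_le (by omega)]
      simp only [pvAdvanceAux]
      omega

-- bisect_left is monotone in the target
theorem pvBisectLeft_mono (Xs : List Int) (hs : Xs.Pairwise (· ≤ ·)) {x1 x2 : Int}
    (h : x1 ≤ x2) : PySem.List.bisectLeft Xs x1 ≤ PySem.List.bisectLeft Xs x2 := by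
  obtain ⟨ha1, ha2, ha3⟩ := PySem.List.bisectLeft_spec Xs x1 hs
  obtain ⟨hb1, hb2, hb3⟩ := PySem.List.bisectLeft_spec Xs x2 hs
  by_contra hc
  have hj : PySem.List.bisectLeft Xs x2 < Xs.length := by omega
  have := ha2 _ hj (by omega)
  have := hb3 _ hj (by omega)
  omega

-- B's sweep over x-sorted animals counts the per-animal indicator
theorem pvFold_inv (Xs : List Int) (hs : Xs.Pairwise (· ≤ ·)) (m L : Int) :
    ∀ (l : List (Int × Int)) (k0 : Nat) (h0 : Int),
      (∀ p ∈ l, k0 ≤ PySem.List.bisectLeft Xs p.1) →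
      l.Pairwise (fun p q => p.1 ≤ q.1) →
      (l.foldl (pvStep Xs m L) (k0, h0)).2 = h0 + (l.countP (pvInd Xs m L) : Int) := by
  intro l
  induction l with
  | nil => intro k0 h0 _ _; simp
  | cons p t ih =>
    intro k0 h0 hk hpw
    obtain ⟨hph, hpt⟩ := List.pairwise_cons.mp hpw
    have hadv : pvAdvance Xs p.1 k0 = PySem.List.bisectLeft Xs p.1 :=
      pvAdvance_eq Xs p.1 hs Xs.length k0 (by omega) (hk p (List.mem_cons_self ..))
    have hkt : ∀ q ∈ t, PySem.List.bisectLeft Xs p.1 ≤ PySem.List.bisectLeft Xs q.1 :=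
      fun q hq => pvBisectLeft_mono Xs hs (hph q hq)
    rw [List.foldl_cons, List.countP_cons]
    have hstep : pvStep Xs m L (k0, h0) p =
        (PySem.List.bisectLeft Xs p.1, if pvInd Xs m L p then h0 + 1 else h0) := by
      show (let k := pvAdvance Xs p.1 k0
        if (0 < k ∧ (k : Int) ≤ m ∧ p.1 - (PySem.List.pyGet? Xs ((k : Int) - 1)).getD 0 ≤ L - p.2)
            ∨ ((k : Int) < m ∧ (PySem.List.pyGet? Xs (k : Int)).getD 0 - p.1 ≤ L - p.2)
        then (k, h0 + 1) else (k, h0)) = _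
      simp only [hadv]
      unfold pvInd
      by_cases hc : (0 < PySem.List.bisectLeft Xs p.1 ∧ (PySem.List.bisectLeft Xs p.1 : Int) ≤ m ∧
            p.1 - (PySem.List.pyGet? Xs ((PySem.List.bisectLeft Xs p.1 : Int) - 1)).getD 0 ≤ L - p.2)
          ∨ ((PySem.List.bisectLeft Xs p.1 : Int) < m ∧
            (PySem.List.pyGet? Xs (PySem.List.bisectLeft Xs p.1 : Int)).getD 0 - p.1 ≤ L - p.2)
      · rw [if_pos hc, if_pos (decide_eq_true hc)]
      · rw [if_neg hc, if_neg (by simpa using hc)]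
    rw [hstep]
    by_cases hi : pvInd Xs m L p
    · rw [if_pos hi, ih _ _ hkt hpt, if_pos hi]
      push_cast
      ring
    · rw [if_neg hi, ih _ _ hkt hpt, if_neg hi]
      push_cast
      ring

-- any cannon within reach gives B's predecessor/successor hit (used where len(X) ≤ M)
theorem pvReach_hit (Xs : List Int) (hs : Xs.Pairwise (· ≤ ·)) (M L x y : Int)
    (hM : (Xs.length : Int) ≤ M) (a : Int) (ha : a ∈ Xs) (hr : |x - a| ≤ L - y) :
    pvInd Xs (min M (Xs.length : Int)) L (x, y) = true := by
  unfold pvInd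
  rw [decide_eq_true_eq]
  simp only
  obtain ⟨hX1, hX2, hX3⟩ := PySem.List.bisectLeft_spec Xs x hs
  set idx := PySem.List.bisectLeft Xs x with hidx
  obtain ⟨j, hj, hja⟩ := List.mem_iff_getElem.mp ha
  rw [← hja] at hr
  obtain ⟨hr1, hr2⟩ := abs_le.mp hr
  rcases Nat.lt_or_ge j idx with hcase | hcase
  · -- j < idx: the predecessor Xs[idx-1] is within reach
    left
    have hi1 : idx - 1 < Xs.length := by omega
    have hlt : Xs[idx - 1] < x := hX2 (idx - 1) hi1 (by omega)
    have hmono : Xs[j] ≤ Xs[idx - 1] := sorted_mono_pv Xs hs (by omega) hi1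
    refine ⟨by omega, by simp only [le_min_iff]; omega, ?_⟩
    have hcast : ((idx : Int) - 1) = ((idx - 1 : Nat) : Int) := by omega
    rw [hcast, PySem.List.pyGet?_natCast, List.getElem?_eq_getElem hi1]
    simp only [Option.getD_some]
    omega
  · -- idx ≤ j: the successor Xs[idx] is within reach
    right
    have hi1 : idx < Xs.length := by omega
    have hge : x ≤ Xs[idx] := hX3 idx hi1 (le_refl _)
    have hmono : Xs[idx] ≤ Xs[j] := sorted_mono_pv Xs hs hcase hj
    refine ⟨by simp only [lt_min_iff]; omega, ?_⟩
    rw [PySem.List.pyGet?_natCast, List.getElem?_eq_getElem hi1]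
    simp only [Option.getD_some]
    omega

-- on inputs where A does not raise, A's three-probe test equals B's predecessor/successor test
theorem hit_iff_pv (Xs : List Int) (hs : Xs.Pairwise (· ≤ ·)) (M L : Int) (p : Int × Int)
    (H : M ≤ (Xs.length : Int) ∨
      ¬(Xs.countP (fun a => decide (p.1 ≤ a)) ≤ 1 ∧ ∀ a ∈ Xs, ¬(|p.1 - a| ≤ L - p.2))) :
    pvProbe Xs M L p = pvInd Xs (min M (Xs.length : Int)) L p := by
  obtain ⟨x, y⟩ := p
  simp only at H
  obtain ⟨hX1, hX2, hX3⟩ := PySem.List.bisectLeft_spec Xs x hs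
  have hcnt := countP_ge_eq_pv Xs hs x
  have hex : ¬(PySem.List.bisectLeft Xs x ≥ Xs.length - 1 ∧ (Xs.length : Int) < M) ∨
      ∃ a ∈ Xs, |x - a| ≤ L - y := by
    rcases H with h | h
    · left; omega
    · rcases not_and_or.mp h with h | h
      · left
        intro ⟨hi, _⟩
        exact h (by omega)
      · right
        push_neg at h
        exact h
  apply Bool.eq_iff_iff.mpr
  unfold pvProbe pvInd
  simp only [List.any_cons, List.any_nil, Bool.or_false, Bool.or_eq_true, Bool.and_eq_true,
    decide_eq_true_eq]
  set idx := PySem.List.bisectLeft Xs x with hidx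
  constructor
  · -- some probe hits ⟹ predecessor or successor hit
    rintro (⟨⟨hge, hlt⟩, hcond⟩ | ⟨⟨hge, hlt⟩, hcond⟩ | ⟨⟨hge, hlt⟩, hcond⟩)
    · -- probe at idx-1: a real in-range predecessor
      left
      have hi1 : idx - 1 < Xs.length := by omega
      rw [show ((idx : Int) + (-1)) = ((idx - 1 : Nat) : Int) from by omega,
        PySem.List.pyGet?_natCast, List.getElem?_eq_getElem hi1] at hcond
      simp only [Option.getD_some] at hcond
      have hltx : Xs[idx - 1] < x := hX2 (idx - 1) hi1 (by omega)
      rw [abs_of_nonneg (by omega)] at hcond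
      refine ⟨by omega, by simp only [le_min_iff]; omega, ?_⟩
      rw [show ((idx : Int) - 1) = ((idx - 1 : Nat) : Int) from by omega,
        PySem.List.pyGet?_natCast, List.getElem?_eq_getElem hi1]
      simp only [Option.getD_some]
      omega
    · -- probe at idx
      by_cases hin : idx < Xs.length
      · right
        rw [show ((idx : Int) + 0) = ((idx : Nat) : Int) from by omega,
          PySem.List.pyGet?_natCast, List.getElem?_eq_getElem hin] at hcond
        simp only [Option.getD_some] at hcond
        have hgex : x ≤ Xs[idx] := hX3 idx hin (le_refl _)
        rw [abs_of_nonpos (by omega)] at hcond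
        refine ⟨by simp only [lt_min_iff]; omega, ?_⟩
        rw [PySem.List.pyGet?_natCast, List.getElem?_eq_getElem hin]
        simp only [Option.getD_some]
        omega
      · -- idx = len: in Python this probe raises unless excluded; here H yields a reachable cannon
        rcases hex with h | ⟨a, ha, hr⟩
        · exact absurd ⟨by omega, by omega⟩ h
        · have hhit := pvReach_hit Xs hs M L x y (by omega) a ha hr
          unfold pvInd at hhit
          have hhit' := decide_eq_true_eq.mp hhit
          simp only at hhit'
          exact hhit'
    · -- probe at idx+1
      by_cases hin : idx + 1 < Xs.length
      · right
        rw [show ((idx : Int) + 1) = ((idx + 1 : Nat) : Int) from by omega,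
          PySem.List.pyGet?_natCast, List.getElem?_eq_getElem hin] at hcond
        simp only [Option.getD_some] at hcond
        have hin0 : idx < Xs.length := by omega
        have hgex : x ≤ Xs[idx + 1] := hX3 (idx + 1) hin (by omega)
        have hmono : Xs[idx] ≤ Xs[idx + 1] := sorted_mono_pv Xs hs (by omega) hin
        rw [abs_of_nonpos (by omega)] at hcond
        refine ⟨by simp only [lt_min_iff]; omega, ?_⟩
        rw [PySem.List.pyGet?_natCast, List.getElem?_eq_getElem hin0]
        simp only [Option.getD_some]
        omega
      · -- idx+1 ≥ len: the raising corner again; H yields a reachable cannon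
        rcases hex with h | ⟨a, ha, hr⟩
        · exact absurd ⟨by omega, by omega⟩ h
        · have hhit := pvReach_hit Xs hs M L x y (by omega) a ha hr
          unfold pvInd at hhit
          have hhit' := decide_eq_true_eq.mp hhit
          simp only at hhit'
          exact hhit'
  · -- predecessor/successor hit ⟹ the matching probe hits
    rintro (⟨hpos, hle, hcond⟩ | ⟨hlt, hcond⟩)
    · -- predecessor: probe i = -1
      left
      simp only [le_min_iff] at hle
      have hi1 : idx - 1 < Xs.length := by omega
      rw [show ((idx : Int) - 1) = ((idx - 1 : Nat) : Int) from by omega,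
        PySem.List.pyGet?_natCast, List.getElem?_eq_getElem hi1] at hcond
      simp only [Option.getD_some] at hcond
      have hltx : Xs[idx - 1] < x := hX2 (idx - 1) hi1 (by omega)
      refine ⟨⟨by omega, by omega⟩, ?_⟩
      rw [show ((idx : Int) + (-1)) = ((idx - 1 : Nat) : Int) from by omega,
        PySem.List.pyGet?_natCast, List.getElem?_eq_getElem hi1]
      simp only [Option.getD_some]
      rw [abs_of_nonneg (by omega)]
      omega
    · -- successor: probe i = 0
      right; left
      simp only [lt_min_iff] at hlt
      have hin : idx < Xs.length := by omega
      rw [PySem.List.pyGet?_natCast, List.getElem?_eq_getElem hin] at hcond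
      simp only [Option.getD_some] at hcond
      have hgex : x ≤ Xs[idx] := hX3 idx hin (le_refl _)
      refine ⟨⟨by omega, by omega⟩, ?_⟩
      rw [show ((idx : Int) + 0) = ((idx : Nat) : Int) from by omega,
        PySem.List.pyGet?_natCast, List.getElem?_eq_getElem hin]
      simp only [Option.getD_some]
      rw [abs_of_nonpos (by omega)]
      omega

-- ===== VERDICT =====
theorem solution_spec : Claim_equal_solution := by
  intro N M L X animal _hDom hPre
  unfold Spec_solution solution solution_alt
  set Xs := PySem.List.sorted X (fun v => v) false with hXs
  have hs : Xs.Pairwise (· ≤ ·) := PySem.List.sorted_pairwise X (fun v => v)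
  have hperm : Xs.Perm X := PySem.List.sorted_perm X (fun v => v) false
  have hPre2 : ∀ p ∈ animal, M ≤ (Xs.length : Int) ∨
      ¬(Xs.countP (fun a => decide (p.1 ≤ a)) ≤ 1 ∧ ∀ a ∈ Xs, ¬(|p.1 - a| ≤ L - p.2)) := by
    intro p hp
    rcases hPre with h | h
    · left
      rw [PySem.List.length_sorted]
      exact h
    · right
      rw [hperm.countP_eq]
      intro ⟨hc, hall⟩
      exact h p hp ⟨hc, fun a ha => hall a (hperm.mem_iff.mpr ha)⟩
  rw [PySem.List.foldl_count_if (pvProbe Xs M L) animal 0, zero_add]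
  have hpwa : (PySem.List.sorted animal (fun p => p.1) false).Pairwise
      (fun p q => p.1 ≤ q.1) := PySem.List.sorted_pairwise animal (fun p => p.1)
  rw [pvFold_inv Xs hs (min M (Xs.length : Int)) L _ 0 0 (fun _ _ => Nat.zero_le _) hpwa,
    zero_add]
  rw [(PySem.List.sorted_perm animal (fun p => p.1) false).countP_eq]
  congr 1
  exact List.countP_congr fun p hp => by
    rw [hit_iff_pv Xs hs M L p (hPre2 p hp)]
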